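-- pv_equiv track=rewrite | github.com/chlor/GeMTeX-Pseudonymization | ClinSurGenNew/Substitution/Name/__init__.py | classify_name
-- ===== SOURCE A (Python) =====
-- ARTICLES = ['der', 'die', 'das', 'den', 'dem', 'des', 'ein', 'eine', 'einen',
--             'einem', 'einer', 'eines', 'el', 'la', 'los', 'las', 'le', 'les', 'l']
--
-- PREPOSITIONS = ['ab', 'an', 'auf', 'aus', 'bei', 'bis', 'durch', 'für', 'gegen',
--                 'ohne', 'um', 'unter', 'über', 'vor', 'hinter', 'neben', 'zwischen',
--                 'nach', 'mit', 'von', 'zu', 'gegenüber', 'während', 'trotz', 'wegen',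
--                 'statt', 'gemäß', 'entlang', 'seit', 'laut', 'vom', 'zur', 'zum',
--                 'beim', 'van', 'des', 'de', 'del', 'dos']
--
-- def is_prep_or_article(word):
--     return word.lower() in ARTICLES or word.lower() in PREPOSITIONS
--
-- def classify_name(name):
--     parts = name.split()
--
--     # Rule 1: Names with commas (e.g., "LAST, First")
--     if ',' in name:
--         comma_index = next(i for i, part in enumerate(parts) if ',' in part)
--         return ['LN'] * (comma_index + 1) + ['FN'] * (len(parts) - comma_index - 1)
--
--     # Rule 2: Single word names are assumed to be last names
--     if len(parts) == 1:
--         return ['LN']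
--
--     # Rule 3: Two-word names are assumed to be "First Last" if there is no preposition
--     if len(parts) == 2 and not any(is_prep_or_article(part) for part in parts):
--         return ['FN', 'LN']
--
--     # Rule 4: Names with more than two words
--     classification = []
--     last_name_started = False
--
--     for i, part in enumerate(parts):
--         # Start of last name if it's a preposition/article or we've already started the last name
--         if is_prep_or_article(part) or last_name_started:
--             classification.append('LN')
--             last_name_started = True
--         # Last word is always part of the last name
--         elif i == len(parts) - 1:
--             classification.append('LN')
--         # Otherwise, it's a first name (or middle name)
--         else:
--             classification.append('FN')
--
--     return classification
-- ===== SOURCE B (Python) =====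
-- ARTICLES = ['der', 'die', 'das', 'den', 'dem', 'des', 'ein', 'eine', 'einen',
--             'einem', 'einer', 'eines', 'el', 'la', 'los', 'las', 'le', 'les', 'l']
--
-- PREPOSITIONS = ['ab', 'an', 'auf', 'aus', 'bei', 'bis', 'durch', 'für', 'gegen',
--                 'ohne', 'um', 'unter', 'über', 'vor', 'hinter', 'neben', 'zwischen',
--                 'nach', 'mit', 'von', 'zu', 'gegenüber', 'während', 'trotz', 'wegen',
--                 'statt', 'gemäß', 'entlang', 'seit', 'laut', 'vom', 'zur', 'zum',
--                 'beim', 'van', 'des', 'de', 'del', 'dos']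
--
-- STOPWORDS = set(ARTICLES + PREPOSITIONS)
--
--
-- def classify_name(name):
--     parts = name.split()
--
--     # Names with commas: everything up to (and including) the comma word is LN
--     if ',' in name:
--         k = next(i for i, p in enumerate(parts) if ',' in p)
--         return ['LN'] * (k + 1) + ['FN'] * (len(parts) - k - 1)
--
--     if not parts:
--         return []
--
--     # Pivot: the last name starts at the first article/preposition,
--     # or at the final word if there is none.
--     pivot = next((i for i, w in enumerate(parts) if w.lower() in STOPWORDS),
--                  len(parts) - 1)
--     return ['FN'] * pivot + ['LN'] * (len(parts) - pivot)
-- ===== Notes on version B (the rewrite author's own statement) =====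
-- stated objective: simpler
-- what changed: Replaces the stateful last_name_started flag loop plus the single-word and two-word special-case rules by one pivot computation: the index of the first article/preposition (default: the last word) splits the parts into FN-prefix and LN-suffix.
import Mathlib
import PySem

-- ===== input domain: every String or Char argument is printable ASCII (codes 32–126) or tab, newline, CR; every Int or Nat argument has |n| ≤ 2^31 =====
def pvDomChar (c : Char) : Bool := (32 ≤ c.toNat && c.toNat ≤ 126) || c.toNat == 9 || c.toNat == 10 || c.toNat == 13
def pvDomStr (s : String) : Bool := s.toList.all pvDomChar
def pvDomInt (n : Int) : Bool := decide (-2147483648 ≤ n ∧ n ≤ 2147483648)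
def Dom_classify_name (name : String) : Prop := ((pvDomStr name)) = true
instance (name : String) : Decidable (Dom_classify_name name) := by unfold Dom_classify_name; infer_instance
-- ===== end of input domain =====

-- B replaces A's stateful flag loop and its special-case rules by a single first-article/preposition pivot (objective: simpler).

-- ===== PORT A =====
def pvArticles : List String :=
  ["der", "die", "das", "den", "dem", "des", "ein", "eine", "einen",
   "einem", "einer", "eines", "el", "la", "los", "las", "le", "les", "l"]

def pvPrepositions : List String :=
  ["ab", "an", "auf", "aus", "bei", "bis", "durch", "für", "gegen",
   "ohne", "um", "unter", "über", "vor", "hinter", "neben", "zwischen",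
   "nach", "mit", "von", "zu", "gegenüber", "während", "trotz", "wegen",
   "statt", "gemäß", "entlang", "seit", "laut", "vom", "zur", "zum",
   "beim", "van", "des", "de", "del", "dos"]

def is_prep_or_article (word : String) : Bool :=
  pvArticles.contains (PySem.Str.lower word) || pvPrepositions.contains (PySem.Str.lower word)

-- the 'for i, part in enumerate(parts)' loop of Rule 4, state = (index i, last_name_started)
def pvRule4 (n : Nat) : Nat → Bool → List String → List String
  | _, _, [] => []
  | i, started, w :: ws =>
    if is_prep_or_article w || started then "LN" :: pvRule4 n (i + 1) true ws
    else if i = n - 1 then "LN" :: pvRule4 n (i + 1) started ws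
    else "FN" :: pvRule4 n (i + 1) started ws

def classify_name (name : String) : List String :=
  let parts := PySem.Str.split₀ name
  if PySem.Str.isIn "," name then
    -- next(i for i, part in enumerate(parts) if ',' in part); the none case would be
    -- Python's StopIteration, unreachable since the comma lands in some split part
    match parts.findIdx? (fun p => PySem.Str.isIn "," p) with
    | some k => List.replicate (k + 1) "LN" ++ List.replicate (parts.length - (k + 1)) "FN"
    | none => []
  else if parts.length = 1 then ["LN"]
  else if parts.length = 2 ∧ parts.any is_prep_or_article = false then ["FN", "LN"]
  else pvRule4 parts.length 0 false parts

-- ===== PORT B =====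
def pvStopwords : List String := PySem.Set.ofList (pvArticles ++ pvPrepositions)

def classify_name_alt (name : String) : List String :=
  let parts := PySem.Str.split₀ name
  if PySem.Str.isIn "," name then
    match parts.findIdx? (fun p => PySem.Str.isIn "," p) with
    | some k => List.replicate (k + 1) "LN" ++ List.replicate (parts.length - (k + 1)) "FN"
    | none => []
  else if parts.isEmpty then []
  else
    let pivot := (parts.findIdx? (fun w => pvStopwords.contains (PySem.Str.lower w))).getD (parts.length - 1)
    List.replicate pivot "FN" ++ List.replicate (parts.length - pivot) "LN"

-- ===== PRECONDITION & SPEC =====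
def Spec_classify_name (name : String) (out : List String) : Prop := out = classify_name_alt name
instance (name : String) (out : List String) : Decidable (Spec_classify_name name out) := by unfold Spec_classify_name; infer_instance

-- ===== CLAIM (what is proved, stated in full; the proofs are below) =====
def Claim_equal_classify_name : Prop := ∀ (name : String), Dom_classify_name name → Spec_classify_name name (classify_name name)

-- ===== LEMMAS AND PROOFS =====

-- B's stopword test is A's is_prep_or_article
theorem stop_eq (w : String) :
    pvStopwords.contains (PySem.Str.lower w) = is_prep_or_article w := by
  rw [Bool.eq_iff_iff]
  simp [pvStopwords, is_prep_or_article, PySem.Set.mem_ofList]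

-- once the flag is set, the rest is all "LN"
theorem pvRule4_true (n i : Nat) (ws : List String) :
    pvRule4 n i true ws = List.replicate ws.length "LN" := by
  induction ws generalizing i with
  | nil => simp [pvRule4]
  | cons w ws ih => simp [pvRule4, ih, List.replicate_succ]

-- flag not yet set: the result is determined by the first article/preposition (pivot)
theorem pvRule4_false (n i : Nat) (ws : List String) (h : i + ws.length = n) :
    pvRule4 n i false ws =
      match ws.findIdx? is_prep_or_article with
      | some p => List.replicate p "FN" ++ List.replicate (ws.length - p) "LN"
      | none => List.replicate (ws.length - 1) "FN" ++ List.replicate (ws.length - (ws.length - 1)) "LN" := by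
  induction ws generalizing i with
  | nil => simp [pvRule4]
  | cons w ws ih =>
    by_cases hp : is_prep_or_article w = true
    · simp [pvRule4, hp, List.findIdx?_cons, pvRule4_true, List.replicate_succ]
    · cases ws with
      | nil =>
        have hi : i = n - 1 := by simp at h; omega
        simp [pvRule4, hp, hi, List.findIdx?_cons]
      | cons w2 ws2 =>
        have hi : i ≠ n - 1 := by simp at h; omega
        rw [pvRule4, if_neg (by simp [hp]), if_neg hi, ih (i + 1) (by simp at h ⊢; omega),
          List.findIdx?_cons (x := w) (xs := w2 :: ws2), if_neg hp]
        cases hfind : List.findIdx? is_prep_or_article (w2 :: ws2) with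
        | none => simp [List.replicate_succ]
        | some p => simp [List.replicate_succ, Nat.succ_sub_succ]

-- the non-comma branches of A and B agree on any parts list
theorem core_eq (parts : List String) :
    (if parts.length = 1 then ["LN"]
     else if parts.length = 2 ∧ parts.any is_prep_or_article = false then ["FN", "LN"]
     else pvRule4 parts.length 0 false parts)
    =
    (if parts.isEmpty then ([] : List String)
     else
       let pivot := (parts.findIdx? is_prep_or_article).getD (parts.length - 1)
       List.replicate pivot "FN" ++ List.replicate (parts.length - pivot) "LN") := by
  rcases parts with _ | ⟨w, _ | ⟨w2, rest⟩⟩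
  · simp [pvRule4]
  · by_cases hw : is_prep_or_article w = true <;> simp [List.findIdx?_cons, hw]
  · by_cases hC : (w :: w2 :: rest).length = 2 ∧ (w :: w2 :: rest).any is_prep_or_article = false
    · obtain ⟨h2, hany⟩ := hC
      have hrest : rest = [] := by cases rest <;> simp_all
      subst hrest
      have hfind : List.findIdx? is_prep_or_article [w, w2] = none := by
        rw [List.findIdx?_eq_none_iff]
        simp at hany ⊢
        exact hany
      rw [if_neg (by simp), if_pos ⟨h2, hany⟩, if_neg (by simp), hfind]
      simp [List.replicate_succ]
    · rw [if_neg (by simp), if_neg hC, if_neg (by simp),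
        pvRule4_false (w :: w2 :: rest).length 0 _ (by simp)]
      cases hfind : List.findIdx? is_prep_or_article (w :: w2 :: rest) with
      | none => simp
      | some p => simp

-- ===== VERDICT (by name: the statement is the Claim_ definition above) =====
theorem classify_name_spec : Claim_equal_classify_name := by
  intro name _
  show classify_name name = classify_name_alt name
  have hfix : (fun w => pvStopwords.contains (PySem.Str.lower w)) = is_prep_or_article :=
    funext stop_eq
  simp only [classify_name, classify_name_alt, hfix]
  by_cases hc : PySem.Str.isIn "," name = true
  · have hc' : PySem.Chars.isIn [','] name.toList = true := by simpa using hc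
    simp [hc']
  · simp only [hc, if_false, Bool.false_eq_true]
    exact core_eq (PySem.Str.split₀ name)
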